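-- pv_equiv track=rewrite | github.com/schyen/AdventOfCode2021 | scripts/day8.py | map_six_seg
-- ===== SOURCE A (Python) =====
-- def map_six_seg(map_seg, query):
--     # letters for 5,4
--     ref = [v for k, v in map_seg.items() if k in [5,4]]
--     ref = ''.join(ref)
--     ref = list(set(ref))
--     for q in query:
--         diff = [x for x in q if x not in ref]
--         # map 9
--         if len(diff) == 0:
--             map_seg[9] = q
--             # drop q from query
--             query = [x for x in query if x != q]
--     ref = map_seg.get(7)
--     for q in query:
--         extra_ref = [x for x in ref if x not in q]
--         if len(extra_ref) == 1:
--             map_seg[6] = q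
--         elif len(extra_ref) == 0:
--             map_seg[0] = q
--     return map_seg
-- ===== SOURCE B (Python) =====
-- def map_six_seg(map_seg, query):
--     # one classification pass over query (no query filtering, no second scan),
--     # then apply the 9-assignments before the 6/0-assignments
--     s54 = {c for k, v in map_seg.items() if k in (5, 4) for c in v}
--     ref7 = map_seg.get(7)
--     nines = []
--     others = []
--     for q in query:
--         if all(c in s54 for c in q):
--             nines.append(q)
--         else:
--             missing = sum(1 for x in ref7 if x not in q)
--             if missing == 1:
--                 others.append((6, q))
--             elif missing == 0:
--                 others.append((0, q))
--     for q in nines: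
--         map_seg[9] = q
--     for k, q in others:
--         map_seg[k] = q
--     return map_seg
-- ===== Notes on version B (the rewrite author's own statement) =====
-- stated objective: simpler
-- what changed: Replaces A's two sequential passes (the first of which rebuilds the query list to drop each matched 9-candidate, the second re-scanning the filtered list) with a single classification pass that sorts each query string into a nines list or a (6/0, q) assignment list, then applies the assignments in priority order; no query filtering or second scan remains.
import Mathlib
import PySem

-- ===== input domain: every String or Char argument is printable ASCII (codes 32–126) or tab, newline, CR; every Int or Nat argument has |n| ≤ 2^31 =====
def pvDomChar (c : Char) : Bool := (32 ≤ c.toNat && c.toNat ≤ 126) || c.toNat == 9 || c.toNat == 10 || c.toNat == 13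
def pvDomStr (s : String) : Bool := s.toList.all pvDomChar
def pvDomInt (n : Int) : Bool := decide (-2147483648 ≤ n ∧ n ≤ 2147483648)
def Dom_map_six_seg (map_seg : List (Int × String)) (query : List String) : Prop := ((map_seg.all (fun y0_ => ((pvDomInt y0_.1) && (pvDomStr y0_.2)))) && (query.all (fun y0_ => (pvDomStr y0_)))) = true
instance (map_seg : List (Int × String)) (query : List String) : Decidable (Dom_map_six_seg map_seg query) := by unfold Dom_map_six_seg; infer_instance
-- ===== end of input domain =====

-- B replaces A's two sequential passes (with repeated query re-filtering) by one classification
-- pass plus ordered application; equivalence is about the RETURN value (the Python A and B both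
-- mutate the map_seg dict in the same way).

-- ===== PORT A =====
-- step of A's first loop: if all of q's letters are in ref, record 9 and drop q from query
def pvStep1 (ref : PySem.Set Char) (st : PySem.Dict Int String × List String) (q : String) :
    PySem.Dict Int String × List String :=
  -- diff = [x for x in q if x not in ref]; if len(diff) == 0: record 9, drop q
  if (q.toList.filter (fun x => !(ref.contains x))).length = 0 then
    (st.1.insert 9 q, st.2.filter (fun x => x != q))
  else st

-- step of A's second loop over the filtered query
def pvStep2 (r : String) (d : PySem.Dict Int String) (q : String) : PySem.Dict Int String :=
  -- extra_ref = [x for x in ref if x not in q]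
  if (r.toList.filter (fun x => !(q.toList.contains x))).length = 1 then d.insert 6 q
  else if (r.toList.filter (fun x => !(q.toList.contains x))).length = 0 then d.insert 0 q
  else d

def map_six_seg (map_seg : List (Int × String)) (query : List String) : List (Int × String) :=
  let d0 : PySem.Dict Int String := PySem.Dict.mk map_seg
  let refL := (d0.items.filter (fun p => p.1 == 5 || p.1 == 4)).map (·.2)
  let ref := PySem.Set.ofList (PySem.Str.join "" refL).toList
  let st := query.foldl (pvStep1 ref) (d0, query)
  match st.1.get? 7 with
  | none => st.1.items   -- Python raises TypeError here iff st.2 ≠ []; those inputs are outside Pre_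
  | some r => (st.2.foldl (pvStep2 r) st.1).items

-- ===== PORT B =====
-- one classification step of B's single pass (ref7.getD "" totalizes the TypeError
-- Python B raises when ref7 is None and a non-nine q occurs; outside Pre_)
def pvClassify (s54 : PySem.Set Char) (ref7 : Option String)
    (st : List String × List (Int × String)) (q : String) : List String × List (Int × String) :=
  if q.toList.all (fun c => s54.contains c) then (st.1 ++ [q], st.2)
  -- missing = sum(1 for x in ref7 if x not in q)
  else if ((ref7.getD "").toList.filter (fun x => !(q.toList.contains x))).length = 1 then
    (st.1, st.2 ++ [((6 : Int), q)])
  else if ((ref7.getD "").toList.filter (fun x => !(q.toList.contains x))).length = 0 then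
    (st.1, st.2 ++ [((0 : Int), q)])
  else st

def map_six_seg_alt (map_seg : List (Int × String)) (query : List String) : List (Int × String) :=
  let d0 : PySem.Dict Int String := PySem.Dict.mk map_seg
  let s54 := PySem.Set.ofList ((d0.items.filter (fun p => p.1 == 5 || p.1 == 4)).flatMap (fun p => p.2.toList))
  let ref7 := d0.get? 7
  let st := query.foldl (pvClassify s54 ref7) ([], [])
  let d1 := st.1.foldl (fun d q => d.insert 9 q) d0
  (st.2.foldl (fun d p => d.insert p.1 p.2) d1).items

-- ===== PRECONDITION & SPEC =====
-- Pre_ excludes exactly the inputs where A raises TypeError: key 7 absent while some query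
-- string has a letter outside the 5/4 letter set (so A's second loop iterates over None).
def Pre_map_six_seg (map_seg : List (Int × String)) (query : List String) : Prop :=
  (∃ p ∈ map_seg, p.1 = 7) ∨
  (∀ q ∈ query, ∀ c ∈ q.toList, ∃ p ∈ map_seg, (p.1 = 5 ∨ p.1 = 4) ∧ c ∈ p.2.toList)
instance (map_seg : List (Int × String)) (query : List String) : Decidable (Pre_map_six_seg map_seg query) := by unfold Pre_map_six_seg; infer_instance

def pvWitness_map_six_seg : (List (Int × String)) × List String :=
  ([(7, "abc"), (5, "ab"), (4, "bd")], ["ab", "ce"])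

def Spec_map_six_seg (map_seg : List (Int × String)) (query : List String) (out : List (Int × String)) : Prop := out = map_six_seg_alt map_seg query
instance (map_seg : List (Int × String)) (query : List String) (out : List (Int × String)) : Decidable (Spec_map_six_seg map_seg query out) := by unfold Spec_map_six_seg; infer_instance

-- ===== CLAIM (what is proved, stated in full; the proofs are below) =====
def Claim_equal_map_six_seg : Prop := ∀ (map_seg : List (Int × String)) (query : List String), Dom_map_six_seg map_seg query → Pre_map_six_seg map_seg query → Spec_map_six_seg map_seg query (map_six_seg map_seg query)

-- ===== LEMMAS AND PROOFS =====

-- "all letters of q lie in ref" as A's loop tests it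
def pvIs9 (ref : PySem.Set Char) (q : String) : Bool :=
  q.toList.all (fun c => ref.contains c)

theorem pvStep1_eq (ref : PySem.Set Char) (st : PySem.Dict Int String × List String) (q : String) :
    pvStep1 ref st q =
      if pvIs9 ref q then (st.1.insert 9 q, st.2.filter (fun x => x != q)) else st := by
  unfold pvStep1 pvIs9
  by_cases h : (q.toList.filter (fun x => !(ref.contains x))).length = 0
  · rw [if_pos h, if_pos]
    rw [List.length_eq_zero_iff, List.filter_eq_nil_iff] at h
    rw [List.all_eq_true]
    intro c hc
    simpa using h c hc
  · rw [if_neg h, if_neg]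
    intro hall
    apply h
    rw [List.length_eq_zero_iff, List.filter_eq_nil_iff]
    intro c hc
    rw [List.all_eq_true] at hall
    simp [(PySem.Set.contains_iff ref c).mp (hall c hc)]

theorem pvPass1 (ref : PySem.Set Char) (l : List String) (d : PySem.Dict Int String)
    (qs : List String) :
    l.foldl (pvStep1 ref) (d, qs) =
      ((l.filter (pvIs9 ref)).foldl (fun d q => d.insert 9 q) d,
       qs.filter (fun x => !(l.any (fun q => pvIs9 ref q && x == q)))) := by
  induction l generalizing d qs with
  | nil => simp
  | cons q l ih =>
    simp only [List.foldl_cons, pvStep1_eq]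
    by_cases h : pvIs9 ref q
    · rw [if_pos h, ih, List.filter_cons_of_pos h]
      refine Prod.ext rfl ?_
      simp only [List.filter_filter]
      apply List.filter_congr
      intro x _
      by_cases hx : x = q <;> simp [hx, h, Bool.and_comm, bne]
    · rw [if_neg h, ih, List.filter_cons_of_neg h]
      refine Prod.ext rfl ?_
      apply List.filter_congr
      intro x _
      simp [Bool.eq_false_iff.mpr h]

-- B's classification of one non-nine q, as a (possibly empty) assignment list
def pvCls (r : String) (q : String) : List (Int × String) :=
  if (r.toList.filter (fun x => !(q.toList.contains x))).length = 1 then [((6 : Int), q)]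
  else if (r.toList.filter (fun x => !(q.toList.contains x))).length = 0 then [((0 : Int), q)]
  else []

theorem pvPass2 (r : String) (l : List String) (d : PySem.Dict Int String) :
    l.foldl (pvStep2 r) d = (l.flatMap (pvCls r)).foldl (fun d p => d.insert p.1 p.2) d := by
  induction l generalizing d with
  | nil => simp
  | cons q l ih =>
    simp only [List.foldl_cons, List.flatMap_cons, List.foldl_append, pvStep2, pvCls]
    split_ifs <;> simp [ih]

theorem pvClassifySpec (s54 : PySem.Set Char) (r7 : Option String) (l : List String)
    (ns : List String) (os : List (Int × String)) :
    l.foldl (pvClassify s54 r7) (ns, os) =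
      (ns ++ l.filter (pvIs9 s54),
       os ++ (l.filter (fun q => !(pvIs9 s54 q))).flatMap (pvCls (r7.getD ""))) := by
  induction l generalizing ns os with
  | nil => simp
  | cons q l ih =>
    simp only [List.foldl_cons, pvClassify]
    by_cases h : pvIs9 s54 q
    · have hq : q.toList.all (fun c => s54.contains c) = true := h
      rw [if_pos hq, ih, List.filter_cons_of_pos h, List.filter_cons_of_neg (by simp [h])]
      simp
    · have hq : ¬ (q.toList.all (fun c => s54.contains c) = true) := h
      rw [if_neg hq, List.filter_cons_of_neg h,
          List.filter_cons_of_pos (by simp [Bool.eq_false_iff.mpr h]), List.flatMap_cons]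
      by_cases h1 : (((r7.getD "").toList.filter (fun x => !(q.toList.contains x))).length = 1)
      · rw [if_pos h1, ih]
        have hcls : pvCls (r7.getD "") q = [((6 : Int), q)] := by unfold pvCls; rw [if_pos h1]
        rw [hcls]
        simp
      · rw [if_neg h1]
        by_cases h0 : (((r7.getD "").toList.filter (fun x => !(q.toList.contains x))).length = 0)
        · rw [if_pos h0, ih]
          have hcls : pvCls (r7.getD "") q = [((0 : Int), q)] := by
            unfold pvCls; rw [if_neg h1, if_pos h0]
          rw [hcls]
          simp
        · rw [if_neg h0, ih]
          have hcls : pvCls (r7.getD "") q = [] := by unfold pvCls; rw [if_neg h1, if_neg h0]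
          rw [hcls]
          simp

theorem pvGetFoldl9 (l : List String) (d : PySem.Dict Int String) (k : Int) (hk : k ≠ 9) :
    (l.foldl (fun d q => d.insert 9 q) d).get? k = d.get? k := by
  induction l generalizing d with
  | nil => rfl
  | cons q l ih => simp [List.foldl_cons, ih, PySem.Dict.get?_insert_of_ne _ _ hk]

theorem pvInterNil (ls : List (List Char)) : ([] : List Char).intercalate ls = ls.flatten := by
  induction ls with
  | nil => simp [List.intercalate]
  | cons a rest ih =>
    cases rest with
    | nil => simp [List.intercalate]
    | cons b t =>
      simp only [List.intercalate, List.intersperse] at *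
      simp only [List.flatten_cons] at *
      simp [ih]

-- both ports' letter sets have the same membership
theorem pvContains54 (map_seg : List (Int × String)) (c : Char) :
    (PySem.Set.ofList (PySem.Str.join ""
        ((map_seg.filter (fun p => p.1 == 5 || p.1 == 4)).map (·.2))).toList).contains c =
    (PySem.Set.ofList ((map_seg.filter (fun p => p.1 == 5 || p.1 == 4)).flatMap
        (fun p => p.2.toList))).contains c := by
  rw [Bool.eq_iff_iff]
  rw [PySem.Set.contains_iff, PySem.Set.contains_iff, PySem.Set.mem_ofList, PySem.Set.mem_ofList]
  rw [PySem.Str.toList_join]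
  have h0 : "".toList = ([] : List Char) := rfl
  rw [show PySem.Chars.join "".toList = fun l => List.intercalate ([] : List Char) l from by rw [h0]; rfl]
  simp only [pvInterNil, List.map_map, List.mem_flatten, List.mem_flatMap, List.mem_map,
    Function.comp]
  constructor
  · rintro ⟨cs, ⟨p, hp, rfl⟩, hc⟩
    exact ⟨p, hp, hc⟩
  · rintro ⟨p, hp, hc⟩
    exact ⟨p.2.toList, ⟨p, hp, rfl⟩, hc⟩

-- ===== VERDICT (by name: the statement is the Claim_ definition above) =====
theorem map_six_seg_spec : Claim_equal_map_six_seg := by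
  intro map_seg query _ hPre
  unfold Spec_map_six_seg map_six_seg map_six_seg_alt
  simp only []
  rw [pvPass1, pvClassifySpec]
  simp only [List.nil_append]
  have hcont := pvContains54 map_seg
  have his9 : ∀ q, pvIs9 (PySem.Set.ofList (PySem.Str.join ""
      (((PySem.Dict.mk map_seg).items.filter (fun p => p.1 == 5 || p.1 == 4)).map (·.2))).toList) q
      = pvIs9 (PySem.Set.ofList (((PySem.Dict.mk map_seg).items.filter
          (fun p => p.1 == 5 || p.1 == 4)).flatMap (fun p => p.2.toList))) q := by
    intro q
    unfold pvIs9
    exact congrArg (List.all q.toList) (funext hcont)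
  set sA := PySem.Set.ofList (PySem.Str.join ""
      (((PySem.Dict.mk map_seg).items.filter (fun p => p.1 == 5 || p.1 == 4)).map (·.2))).toList with hsA
  set sB := PySem.Set.ofList (((PySem.Dict.mk map_seg).items.filter
      (fun p => p.1 == 5 || p.1 == 4)).flatMap (fun p => p.2.toList)) with hsB
  have hfilter : query.filter (pvIs9 sA) = query.filter (pvIs9 sB) :=
    List.filter_congr (fun q _ => his9 q)
  have hget : ((query.filter (pvIs9 sA)).foldl (fun d q => d.insert 9 q)
      (PySem.Dict.mk map_seg)).get? 7 = (PySem.Dict.mk map_seg).get? 7 :=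
    pvGetFoldl9 _ _ 7 (by decide)
  -- the surviving query of A's first pass = the non-nine elements
  have hqs : query.filter (fun x => !(query.any (fun q => pvIs9 sA q && x == q)))
      = query.filter (fun q => !(pvIs9 sB q)) := by
    apply List.filter_congr
    intro x hx
    rw [← his9 x]
    by_cases h : pvIs9 sA x
    · simp only [h, Bool.not_true]
      have : query.any (fun q => pvIs9 sA q && x == q) = true :=
        List.any_eq_true.mpr ⟨x, hx, by simp [h]⟩
      simp [this]
    · simp only [Bool.eq_false_iff.mpr h, Bool.not_false]
      have : query.any (fun q => pvIs9 sA q && x == q) = false := by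
        rw [List.any_eq_false]
        intro q _
        by_cases hxq : x = q
        · subst hxq; simp [Bool.eq_false_iff.mpr h]
        · simp [hxq]
      simp [this]
  rw [hget, hfilter, hqs]
  cases hd : (PySem.Dict.mk map_seg).get? 7 with
  | some r =>
    simp only [Option.getD_some]
    rw [pvPass2]
  | none =>
    -- Pre_ forces every query string to be a "nine": A's second loop is empty, and so is B's others list
    have h7 : ¬ ∃ p ∈ map_seg, p.1 = 7 := by
      intro ⟨p, hp, hp7⟩
      have : (List.find? (fun p => p.1 == 7) map_seg).isSome := by
        rw [List.find?_isSome]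
        exact ⟨p, hp, by simp [hp7]⟩
      rw [show (PySem.Dict.mk map_seg).get? 7
            = Option.map (fun x => x.2) (List.find? (fun p => p.1 == 7) map_seg) from rfl] at hd
      cases hfind : List.find? (fun p => p.1 == 7) map_seg with
      | none => rw [hfind] at this; simp at this
      | some p => rw [hfind] at hd; simp at hd
    have hall : ∀ q ∈ query, pvIs9 sB q = true := by
      intro q hq
      rcases hPre with h | h
      · exact absurd h h7
      · unfold pvIs9
        rw [List.all_eq_true]
        intro c hc
        rw [PySem.Set.contains_iff, hsB, PySem.Set.mem_ofList, List.mem_flatMap]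
        obtain ⟨p, hp, hp54, hcp⟩ := h q hq c hc
        exact ⟨p, List.mem_filter.mpr ⟨hp, by rcases hp54 with h5 | h5 <;> simp [h5]⟩, hcp⟩
    have hnil : query.filter (fun q => !(pvIs9 sB q)) = [] := by
      rw [List.filter_eq_nil_iff]
      intro q hq
      simp [hall q hq]
    rw [hnil]
    simp [List.filter_eq_self.mpr hall]
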